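-- pv_equiv track=rewrite | github.com/FID-Biodiversity/workshop-demo | biofid_demo/uima.py | get_prioritized_element
-- ===== SOURCE A (Python) =====
-- NE_CLASS_PRIORITY = ["Plant_Flora", "Animal_Fauna", "Taxon"]
--
-- def get_prioritized_element(elem1_name: str, elem2_name: str) -> str:
--     if elem1_name not in NE_CLASS_PRIORITY or elem2_name not in NE_CLASS_PRIORITY:
--         return ''
--
--     priorized_element_name = ''
--     for ne in NE_CLASS_PRIORITY:
--         if ne in elem1_name:
--             priorized_element_name = elem1_name
--             break
--         elif ne in elem2_name:
--             priorized_element_name = elem2_name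
--             break
--
--     return priorized_element_name
-- ===== SOURCE B (Python) =====
-- NE_CLASS_PRIORITY = ["Plant_Flora", "Animal_Fauna", "Taxon"]
--
-- def get_prioritized_element(elem1_name: str, elem2_name: str) -> str:
--     if elem1_name not in NE_CLASS_PRIORITY or elem2_name not in NE_CLASS_PRIORITY:
--         return ''
--     r1 = NE_CLASS_PRIORITY.index(elem1_name)
--     r2 = NE_CLASS_PRIORITY.index(elem2_name)
--     return elem1_name if r1 <= r2 else elem2_name
-- ===== Notes on version B (the rewrite author's own statement) =====
-- stated objective: simpler
-- what changed: Replaces the scan over the priority list with interleaved substring tests and break by two direct rank lookups (.index) and one <= comparison.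
import Mathlib
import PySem

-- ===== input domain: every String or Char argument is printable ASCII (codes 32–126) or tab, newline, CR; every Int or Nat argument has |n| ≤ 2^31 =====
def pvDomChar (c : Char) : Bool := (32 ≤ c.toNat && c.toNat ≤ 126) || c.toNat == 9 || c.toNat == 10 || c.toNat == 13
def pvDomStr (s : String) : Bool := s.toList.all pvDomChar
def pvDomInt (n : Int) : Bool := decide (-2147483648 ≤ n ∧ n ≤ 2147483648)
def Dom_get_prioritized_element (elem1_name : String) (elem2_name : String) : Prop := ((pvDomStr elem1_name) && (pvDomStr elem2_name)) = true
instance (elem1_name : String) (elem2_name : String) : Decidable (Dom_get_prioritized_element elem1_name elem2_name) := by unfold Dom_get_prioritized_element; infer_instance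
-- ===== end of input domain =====

-- B replaces A's scan-with-break (substring tests) by two rank lookups and one comparison (objective: simpler).

def NE_CLASS_PRIORITY : List String := ["Plant_Flora", "Animal_Fauna", "Taxon"]

-- ===== PORT A =====
-- the for-loop with break, checking 'ne in elem1_name' (substring) then 'ne in elem2_name'
def pyLoopA (elem1_name : String) (elem2_name : String) : List String → String
  | [] => ""
  | ne :: rest =>
    if PySem.Str.isIn ne elem1_name then elem1_name
    else if PySem.Str.isIn ne elem2_name then elem2_name
    else pyLoopA elem1_name elem2_name rest

def get_prioritized_element (elem1_name : String) (elem2_name : String) : String :=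
  if ¬ (elem1_name ∈ NE_CLASS_PRIORITY) ∨ ¬ (elem2_name ∈ NE_CLASS_PRIORITY) then ""
  else pyLoopA elem1_name elem2_name NE_CLASS_PRIORITY

-- ===== PORT B =====
def get_prioritized_element_alt (elem1_name : String) (elem2_name : String) : String :=
  if ¬ (elem1_name ∈ NE_CLASS_PRIORITY) ∨ ¬ (elem2_name ∈ NE_CLASS_PRIORITY) then ""
  else
    let r1 := (PySem.List.index? NE_CLASS_PRIORITY elem1_name).getD 0
    let r2 := (PySem.List.index? NE_CLASS_PRIORITY elem2_name).getD 0
    if r1 ≤ r2 then elem1_name else elem2_name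

-- ===== PRECONDITION & SPEC =====
def Spec_get_prioritized_element (elem1_name : String) (elem2_name : String) (out : String) : Prop := out = get_prioritized_element_alt elem1_name elem2_name
instance (elem1_name : String) (elem2_name : String) (out : String) : Decidable (Spec_get_prioritized_element elem1_name elem2_name out) := by unfold Spec_get_prioritized_element; infer_instance

-- ===== CLAIM (what is proved, stated in full; the proofs are below) =====
def Claim_equal_get_prioritized_element : Prop := ∀ (elem1_name : String) (elem2_name : String), Dom_get_prioritized_element elem1_name elem2_name → Spec_get_prioritized_element elem1_name elem2_name (get_prioritized_element elem1_name elem2_name)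

-- ===== LEMMAS AND PROOFS =====
theorem mem_priority_cases (s : String) (h : s ∈ NE_CLASS_PRIORITY) :
    s = "Plant_Flora" ∨ s = "Animal_Fauna" ∨ s = "Taxon" := by
  simpa [NE_CLASS_PRIORITY] using h

-- ===== VERDICT (by name: the statement is the Claim_ definition above) =====
theorem get_prioritized_element_spec : Claim_equal_get_prioritized_element := by
  intro e1 e2 _
  unfold Spec_get_prioritized_element get_prioritized_element get_prioritized_element_alt
  by_cases h1 : e1 ∈ NE_CLASS_PRIORITY
  · by_cases h2 : e2 ∈ NE_CLASS_PRIORITY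
    · rw [if_neg (by simp [h1, h2]), if_neg (by simp [h1, h2])]
      rcases mem_priority_cases e1 h1 with rfl | rfl | rfl <;>
        rcases mem_priority_cases e2 h2 with rfl | rfl | rfl <;> decide
    · simp [h2]
  · simp [h1]
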